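-- pv_equiv track=rewrite | github.com/NortCoding/ada | ada/core/business_engine.py | suggest_microproducts
-- ===== SOURCE A (Python) =====
-- from typing import Any, Dict, List, Optional
--
-- def suggest_microproducts(opportunities: List[Dict[str, Any]]) -> List[Dict[str, Any]]:
--     """
--     Suggest small tools/utility scripts/templates/services aligned with top opportunities.
--     """
--     top = opportunities[:3]
--     microproducts: List[Dict[str, Any]] = []
--
--     for opp in top:
--         if opp["id"] == "kit_debug_cli":
--             microproducts.extend(
--                 [
--                     {
--                         "opportunity_id": opp["id"],
--                         "title": "Playbook: 'fix error' from error text → DIFF → apply",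
--                         "deliverable": "Markdown + example commands + example diff output",
--                     },
--                     {
--                         "opportunity_id": opp["id"],
--                         "title": "Example pack: testOpt scenarios",
--                         "deliverable": "A small folder with broken scripts and their fixed versions",
--                     },
--                 ]
--             )
--         elif opp["id"] == "cli_automation_snippets":
--             microproducts.extend(
--                 [
--                     {
--                         "opportunity_id": opp["id"],
--                         "title": "Mini package: safe runner wrappers",
--                         "deliverable": "A set of small shell/prompt snippets for 'run' with confirmation",
--                     },
--                     {
--                         "opportunity_id": opp["id"],
--                         "title": "Templates: create file with content + verify",
--                         "deliverable": "Examples + docs showing deterministic file writes and sizes",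
--                     },
--                 ]
--             )
--         else:
--             microproducts.extend(
--                 [
--                     {
--                         "opportunity_id": opp["id"],
--                         "title": "Template doc: roadmap → what next → proposal log",
--                         "deliverable": "A one-page template + example output screenshots/text",
--                     }
--                 ]
--             )
--
--     return microproducts
-- ===== SOURCE B (Python) =====
-- from typing import Any, Dict, List, Optional
--
-- _TABLE = {
--     "kit_debug_cli": [
--         ("Playbook: 'fix error' from error text → DIFF → apply",
--          "Markdown + example commands + example diff output"),
--         ("Example pack: testOpt scenarios",
--          "A small folder with broken scripts and their fixed versions"),
--     ],
--     "cli_automation_snippets": [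
--         ("Mini package: safe runner wrappers",
--          "A set of small shell/prompt snippets for 'run' with confirmation"),
--         ("Templates: create file with content + verify",
--          "Examples + docs showing deterministic file writes and sizes"),
--     ],
-- }
--
-- _DEFAULT = [
--     ("Template doc: roadmap → what next → proposal log",
--      "A one-page template + example output screenshots/text"),
-- ]
--
--
-- def _emit(opps, budget):
--     # recursive consumption with a countdown instead of slicing + looping
--     if budget == 0 or not opps:
--         return []
--     oid = opps[0]["id"]
--     head = [{"opportunity_id": oid, "title": t, "deliverable": d}
--             for (t, d) in _TABLE.get(oid, _DEFAULT)]
--     return head + _emit(opps[1:], budget - 1)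
--
--
-- def suggest_microproducts(opportunities: List[Dict[str, Any]]) -> List[Dict[str, Any]]:
--     return _emit(list(opportunities), 3)
-- ===== Notes on version B (the rewrite author's own statement) =====
-- stated objective: alternative
-- what changed: A's imperative loop over a slice with an if/elif/else chain extending an accumulator is replaced by a budget-counting recursion that consumes the list head-first (no slice, no accumulator, output assembled back-to-front by concatenation) and emits each record from a fragment table with a default.
import Mathlib
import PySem

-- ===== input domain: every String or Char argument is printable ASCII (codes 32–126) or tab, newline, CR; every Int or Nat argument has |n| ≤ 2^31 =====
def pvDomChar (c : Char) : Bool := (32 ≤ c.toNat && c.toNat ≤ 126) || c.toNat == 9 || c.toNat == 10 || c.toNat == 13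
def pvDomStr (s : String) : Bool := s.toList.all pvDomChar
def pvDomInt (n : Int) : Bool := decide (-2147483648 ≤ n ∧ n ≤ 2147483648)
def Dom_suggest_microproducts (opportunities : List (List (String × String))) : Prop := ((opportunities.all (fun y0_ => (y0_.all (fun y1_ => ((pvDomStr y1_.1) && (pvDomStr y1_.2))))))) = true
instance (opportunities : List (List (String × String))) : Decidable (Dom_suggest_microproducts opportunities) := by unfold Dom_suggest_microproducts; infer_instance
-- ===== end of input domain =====

-- B replaces A's loop-over-a-slice with an if/elif/else chain by a budget-counting
-- head-first recursion emitting each record from a fragment table (alternative decomposition).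

-- opp["id"] for a dict passed as an association list (used by both ports; under
-- Pre_ the key is present, so the getD default is never observed).
def pyGetId (opp : List (String × String)) : String :=
  (PySem.Dict.get? (PySem.Dict.mk opp) "id").getD ""

-- ===== PORT A =====
def suggest_microproducts (opportunities : List (List (String × String))) : List (List (String × String)) :=
  let top := PySem.List.slice opportunities none (some 3)
  top.foldl (fun microproducts opp =>
    let id := pyGetId opp
    if id == "kit_debug_cli" then
      microproducts ++
        [[("opportunity_id", id),
          ("title", "Playbook: 'fix error' from error text → DIFF → apply"),
          ("deliverable", "Markdown + example commands + example diff output")],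
         [("opportunity_id", id),
          ("title", "Example pack: testOpt scenarios"),
          ("deliverable", "A small folder with broken scripts and their fixed versions")]]
    else if id == "cli_automation_snippets" then
      microproducts ++
        [[("opportunity_id", id),
          ("title", "Mini package: safe runner wrappers"),
          ("deliverable", "A set of small shell/prompt snippets for 'run' with confirmation")],
         [("opportunity_id", id),
          ("title", "Templates: create file with content + verify"),
          ("deliverable", "Examples + docs showing deterministic file writes and sizes")]]
    else
      microproducts ++
        [[("opportunity_id", id),
          ("title", "Template doc: roadmap → what next → proposal log"),
          ("deliverable", "A one-page template + example output screenshots/text")]]) []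

-- ===== PORT B =====
def pvMicroTable : List (String × List (String × String)) :=
  [("kit_debug_cli",
    [("Playbook: 'fix error' from error text → DIFF → apply",
      "Markdown + example commands + example diff output"),
     ("Example pack: testOpt scenarios",
      "A small folder with broken scripts and their fixed versions")]),
   ("cli_automation_snippets",
    [("Mini package: safe runner wrappers",
      "A set of small shell/prompt snippets for 'run' with confirmation"),
     ("Templates: create file with content + verify",
      "Examples + docs showing deterministic file writes and sizes")])]

def pvMicroDefault : List (String × String) :=
  [("Template doc: roadmap → what next → proposal log",
    "A one-page template + example output screenshots/text")]

-- _TABLE.get(oid, _DEFAULT)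
def pvFragments (id : String) : List (String × String) :=
  (PySem.Dict.get? (PySem.Dict.mk pvMicroTable) id).getD pvMicroDefault

-- _emit: recursive consumption with a countdown (Source B's _emit, step for step)
def pvEmit : List (List (String × String)) → Nat → List (List (String × String))
  | _, 0 => []
  | [], _ + 1 => []
  | opp :: rest, b + 1 =>
      let id := pyGetId opp
      (pvFragments id).map
        (fun td => [("opportunity_id", id), ("title", td.1), ("deliverable", td.2)])
      ++ pvEmit rest b

def suggest_microproducts_alt (opportunities : List (List (String × String))) : List (List (String × String)) :=
  pvEmit opportunities 3

-- ===== PRECONDITION & SPEC =====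
-- Pre_ excludes exactly the inputs where one of the first three dicts lacks the
-- key "id": there the Python A raises KeyError (and B raises too).
def Pre_suggest_microproducts (opportunities : List (List (String × String))) : Prop :=
  ((opportunities.take 3).all (fun opp => PySem.Dict.contains (PySem.Dict.mk opp) "id")) = true

instance (opportunities : List (List (String × String))) : Decidable (Pre_suggest_microproducts opportunities) := by
  unfold Pre_suggest_microproducts; infer_instance

def pvWitness_suggest_microproducts : (List (List (String × String))) :=
  [[("id", "kit_debug_cli")], [("id", "other"), ("score", "7")]]

def Spec_suggest_microproducts (opportunities : List (List (String × String))) (out : List (List (String × String))) : Prop := out = suggest_microproducts_alt opportunities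
instance (opportunities : List (List (String × String))) (out : List (List (String × String))) : Decidable (Spec_suggest_microproducts opportunities out) := by unfold Spec_suggest_microproducts; infer_instance

-- ===== CLAIM (what is proved, stated in full; the proofs are below) =====
def Claim_equal_suggest_microproducts : Prop := ∀ (opportunities : List (List (String × String))), Dom_suggest_microproducts opportunities → Pre_suggest_microproducts opportunities → Spec_suggest_microproducts opportunities (suggest_microproducts opportunities)

-- ===== LEMMAS AND PROOFS =====

-- what A emits for one opportunity, as a function of its id
def pvEmitA (id : String) : List (List (String × String)) :=
  if id == "kit_debug_cli" then
    [[("opportunity_id", id),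
      ("title", "Playbook: 'fix error' from error text → DIFF → apply"),
      ("deliverable", "Markdown + example commands + example diff output")],
     [("opportunity_id", id),
      ("title", "Example pack: testOpt scenarios"),
      ("deliverable", "A small folder with broken scripts and their fixed versions")]]
  else if id == "cli_automation_snippets" then
    [[("opportunity_id", id),
      ("title", "Mini package: safe runner wrappers"),
      ("deliverable", "A set of small shell/prompt snippets for 'run' with confirmation")],
     [("opportunity_id", id),
      ("title", "Templates: create file with content + verify"),
      ("deliverable", "Examples + docs showing deterministic file writes and sizes")]]
  else
    [[("opportunity_id", id),
      ("title", "Template doc: roadmap → what next → proposal log"),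
      ("deliverable", "A one-page template + example output screenshots/text")]]

-- A's branch chain agrees with B's table lookup, id by id
theorem pvEmit_eq (id : String) :
    pvEmitA id =
      (pvFragments id).map
        (fun td => [("opportunity_id", id), ("title", td.1), ("deliverable", td.2)]) := by
  by_cases h1 : id = "kit_debug_cli"
  · subst h1; decide
  · by_cases h2 : id = "cli_automation_snippets"
    · subst h2; decide
    · simp [pvEmitA, pvFragments, pvMicroTable, pvMicroDefault, PySem.Dict.get?, h1, h2,
        (Ne.symm h1 : "kit_debug_cli" ≠ id), (Ne.symm h2 : "cli_automation_snippets" ≠ id)]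

theorem pvFoldA_eq (l : List (List (String × String))) :
    l.foldl (fun microproducts opp =>
      let id := pyGetId opp
      if id == "kit_debug_cli" then
        microproducts ++
          [[("opportunity_id", id),
            ("title", "Playbook: 'fix error' from error text → DIFF → apply"),
            ("deliverable", "Markdown + example commands + example diff output")],
           [("opportunity_id", id),
            ("title", "Example pack: testOpt scenarios"),
            ("deliverable", "A small folder with broken scripts and their fixed versions")]]
      else if id == "cli_automation_snippets" then
        microproducts ++
          [[("opportunity_id", id),
            ("title", "Mini package: safe runner wrappers"),
            ("deliverable", "A set of small shell/prompt snippets for 'run' with confirmation")],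
           [("opportunity_id", id),
            ("title", "Templates: create file with content + verify"),
            ("deliverable", "Examples + docs showing deterministic file writes and sizes")]]
      else
        microproducts ++
          [[("opportunity_id", id),
            ("title", "Template doc: roadmap → what next → proposal log"),
            ("deliverable", "A one-page template + example output screenshots/text")]]) [] =
    l.flatMap (fun opp => pvEmitA (pyGetId opp)) := by
  have hbody : (fun (microproducts : List (List (String × String))) opp =>
      let id := pyGetId opp
      if id == "kit_debug_cli" then
        microproducts ++
          [[("opportunity_id", id),
            ("title", "Playbook: 'fix error' from error text → DIFF → apply"),
            ("deliverable", "Markdown + example commands + example diff output")],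
           [("opportunity_id", id),
            ("title", "Example pack: testOpt scenarios"),
            ("deliverable", "A small folder with broken scripts and their fixed versions")]]
      else if id == "cli_automation_snippets" then
        microproducts ++
          [[("opportunity_id", id),
            ("title", "Mini package: safe runner wrappers"),
            ("deliverable", "A set of small shell/prompt snippets for 'run' with confirmation")],
           [("opportunity_id", id),
            ("title", "Templates: create file with content + verify"),
            ("deliverable", "Examples + docs showing deterministic file writes and sizes")]]
      else
        microproducts ++
          [[("opportunity_id", id),
            ("title", "Template doc: roadmap → what next → proposal log"),
            ("deliverable", "A one-page template + example output screenshots/text")]])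
      = (fun microproducts opp => microproducts ++ pvEmitA (pyGetId opp)) := by
    funext acc opp
    simp only [pvEmitA]
    split_ifs <;> rfl
  rw [hbody, PySem.List.foldl_append_eq_flatMap]
  simp

-- B's countdown recursion computes the flatMap of the emitter over the first n items
theorem pvEmit_take (l : List (List (String × String))) (n : Nat) :
    pvEmit l n = (l.take n).flatMap (fun opp =>
      (pvFragments (pyGetId opp)).map
        (fun td => [("opportunity_id", pyGetId opp), ("title", td.1), ("deliverable", td.2)])) := by
  induction l generalizing n with
  | nil => cases n <;> simp [pvEmit]
  | cons opp rest ih =>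
    cases n with
    | zero => simp [pvEmit]
    | succ b => simp [pvEmit, ih]

-- ===== VERDICT (by name: the statement is the Claim_ definition above) =====
theorem suggest_microproducts_spec : Claim_equal_suggest_microproducts := by
  intro opportunities _ _
  unfold Spec_suggest_microproducts suggest_microproducts suggest_microproducts_alt
  rw [pvFoldA_eq, pvEmit_take]
  have hslice : PySem.List.slice opportunities none (some 3) = opportunities.take 3 := by
    simpa using PySem.List.slice_to_natCast opportunities 3
  rw [hslice]
  exact List.flatMap_congr (fun opp _ => pvEmit_eq (pyGetId opp))
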